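-- pv_equiv track=rewrite | github.com/Margarita-Yazykova/AiSD | .idea/lab_5_1.py | gen_parts
-- ===== SOURCE A (Python) =====
-- def gen_parts(n, max_size=10):
--     def split(remain, curr):
--         if not remain:  # Если никого не осталось, добавляем разбиение
--             if len(curr) > 1:  # Исключаем случаи с разбиением одной группой
--                 res.append(curr)
--             return
--         person = remain[0]
--         for i in range(len(curr)):
--             if len(curr[i]) < max_size:  # Добавляем в существующую группу
--                 split(remain[1:], curr[:i] + [curr[i] + [person]] + curr[i + 1:])
--         split(remain[1:], curr + [[person]])  # Создаем новую группу
--     res = []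
--     split(list(range(1, n + 1)), [])
--     return res
-- ===== SOURCE B (Python) =====
-- def gen_parts(n, max_size=10):
--     res = []
--     stack = [(list(range(1, n + 1)), [])]
--     while stack:
--         remain, curr = stack.pop()
--         if not remain:
--             if len(curr) > 1:
--                 res.append(curr)
--             continue
--         person, rest = remain[0], remain[1:]
--         stack.append((rest, curr + [[person]]))
--         for i in range(len(curr) - 1, -1, -1):
--             if len(curr[i]) < max_size:
--                 stack.append((rest, curr[:i] + [curr[i] + [person]] + curr[i + 1:]))
--     return res
-- ===== Notes on version B (the rewrite author's own statement) =====
-- stated objective: alternative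
-- what changed: The nested recursive split() with a closed-over mutable res is replaced by an iterative DFS over an explicit LIFO stack of (remain, curr) states, pushing successors in reverse emission order so the output list and its order are identical.
import Mathlib
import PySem

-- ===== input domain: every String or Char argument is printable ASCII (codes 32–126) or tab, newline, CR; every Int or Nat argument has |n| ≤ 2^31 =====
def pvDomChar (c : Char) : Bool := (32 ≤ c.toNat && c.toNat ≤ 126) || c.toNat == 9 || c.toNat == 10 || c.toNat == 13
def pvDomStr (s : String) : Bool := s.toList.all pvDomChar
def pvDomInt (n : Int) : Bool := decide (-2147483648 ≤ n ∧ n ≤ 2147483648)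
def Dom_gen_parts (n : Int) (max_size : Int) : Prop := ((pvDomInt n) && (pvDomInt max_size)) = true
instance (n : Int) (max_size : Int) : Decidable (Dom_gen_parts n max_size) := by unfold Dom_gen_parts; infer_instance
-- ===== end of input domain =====

-- B replaces the nested recursion by an explicit iterative DFS over a LIFO stack of (remain, curr)
-- states (same output list, same order); objective: alternative decomposition, no speed claim.

-- ===== PORT A =====
-- A's recursive `split`, returning the partitions it appends to `res`, in order.
-- The inner `for i in range(len(curr))` loop is the mutual helper `splitARange`
-- carrying the accumulated appends.
mutual
def splitA (max_size : Int) : List Int → List (List Int) → List (List (List Int))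
  | [], curr => if curr.length > 1 then [curr] else []
  | person :: rest, curr =>
      splitARange max_size person rest curr (List.range curr.length) []
        ++ splitA max_size rest (curr ++ [[person]])
  termination_by remain _ => (2 * remain.length, 0)
  decreasing_by all_goals (simp_wf; omega)

def splitARange (max_size : Int) (person : Int) (rest : List Int)
    (curr : List (List Int)) : List Nat → List (List (List Int)) → List (List (List Int))
  | [], acc => acc
  | i :: is, acc =>
      splitARange max_size person rest curr is
        (if ((curr.getD i []).length : Int) < max_size then
          acc ++ splitA max_size rest
            (curr.take i ++ [(curr.getD i []) ++ [person]] ++ curr.drop (i + 1))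
        else acc)
  termination_by is _ => (2 * rest.length + 1, is.length)
  decreasing_by all_goals (simp_wf; omega)
end

def gen_parts (n : Int) (max_size : Int) : List (List (List Int)) :=
  splitA max_size (PySem.List.pyRange 1 (n + 1) 1) []

-- ===== PORT B =====
-- measure used only for termination of the stack loop
def pvG (r c : Nat) : Nat := (c + r + 2) ^ r
def pvMeas (st : List (List Int × List (List Int))) : Nat :=
  (st.map (fun p => pvG p.1.length p.2.length)).sum

-- B's inner `for i in range(len(curr)-1, -1, -1)` push loop (stack top = list head)
def altPush (max_size : Int) (person : Int) (rest : List Int) (curr : List (List Int)) :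
    List Nat → List (List Int × List (List Int)) → List (List Int × List (List Int))
  | [], st => st
  | i :: is, st =>
      altPush max_size person rest curr is
        (if ((curr.getD i []).length : Int) < max_size then
          (rest, curr.take i ++ [(curr.getD i []) ++ [person]] ++ curr.drop (i + 1)) :: st
        else st)

theorem pvG_pos (r c : Nat) : 0 < pvG r c := Nat.pow_pos (by omega)

theorem pvMeas_cons (r : List Int) (c : List (List Int))
    (st : List (List Int × List (List Int))) :
    pvMeas ((r, c) :: st) = pvG r.length c.length + pvMeas st := by simp [pvMeas]

theorem pvMeas_altPush (max_size : Int) (person : Int) (rest : List Int)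
    (curr : List (List Int)) (is : List Nat) (st : List (List Int × List (List Int)))
    (h : ∀ i ∈ is, i < curr.length) :
    pvMeas (altPush max_size person rest curr is st)
      ≤ is.length * pvG rest.length curr.length + pvMeas st := by
  induction is generalizing st with
  | nil => simp [altPush]
  | cons i is ih =>
    have hi : i < curr.length := h i (by simp)
    have hlen : (curr.take i ++ [(curr.getD i []) ++ [person]] ++ curr.drop (i + 1)).length
        = curr.length := by
      simp [List.length_take, List.length_drop]; omega
    have hg : pvG rest.length
        (curr.take i ++ [(curr.getD i []) ++ [person]] ++ curr.drop (i + 1)).length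
        = pvG rest.length curr.length := by rw [hlen]
    have := ih (fun j hj => h j (by simp [hj]))
      (st := if ((curr.getD i []).length : Int) < max_size then
          (rest, curr.take i ++ [(curr.getD i []) ++ [person]] ++ curr.drop (i + 1)) :: st
        else st)
    simp only [altPush]
    refine this.trans ?_
    split
    · simp only [pvMeas_cons, hg, List.length_cons, Nat.succ_mul]; omega
    · simp only [List.length_cons, Nat.succ_mul]; omega

theorem pvMeas_step (max_size : Int) (person : Int) (rest : List Int)
    (curr : List (List Int)) (st : List (List Int × List (List Int))) :
    pvMeas (altPush max_size person rest curr (List.range curr.length).reverse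
        ((rest, curr ++ [[person]]) :: st))
      < pvG (rest.length + 1) curr.length + pvMeas st := by
  have h := pvMeas_altPush max_size person rest curr (List.range curr.length).reverse
    ((rest, curr ++ [[person]]) :: st) (by intro i hi; simpa using hi)
  refine lt_of_le_of_lt h ?_
  have hm : pvMeas ((rest, curr ++ [[person]]) :: st)
      = pvG rest.length (curr.length + 1) + pvMeas st := by simp [pvMeas]
  rw [hm]
  simp only [List.length_reverse, List.length_range]
  set c := curr.length
  set r := rest.length
  have h1 : pvG r c ≤ (c + r + 3) ^ r := Nat.pow_le_pow_left (by omega) r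
  have h2 : pvG r (c + 1) = (c + r + 3) ^ r := by unfold pvG; ring_nf
  have h3 : pvG (r + 1) c = (c + r + 3) ^ (r + 1) := by unfold pvG; ring_nf
  have hp : 0 < (c + r + 3) ^ r := Nat.pow_pos (by omega)
  have : c * pvG r c + pvG r (c + 1) ≤ (c + 1) * (c + r + 3) ^ r := by
    rw [h2]; nlinarith
  have hlt : (c + 1) * (c + r + 3) ^ r < (c + r + 3) ^ (r + 1) := by
    rw [pow_succ]; nlinarith
  omega

-- B's while-loop: pop the head, either emit or push successors
def altLoop (max_size : Int) :
    List (List Int × List (List Int)) → List (List (List Int)) → List (List (List Int))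
  | [], res => res
  | (remain, curr) :: st, res =>
    match remain with
    | [] => altLoop max_size st (if curr.length > 1 then res ++ [curr] else res)
    | person :: rest =>
        altLoop max_size
          (altPush max_size person rest curr (List.range curr.length).reverse
            ((rest, curr ++ [[person]]) :: st))
          res
termination_by st _ => pvMeas st
decreasing_by
  · have := pvG_pos 0 curr.length
    simp only [pvMeas_cons, List.length_nil]
    omega
  · have := pvMeas_step max_size person rest curr st
    rw [pvMeas_cons, List.length_cons]
    omega

def gen_parts_alt (n : Int) (max_size : Int) : List (List (List Int)) :=
  altLoop max_size [(PySem.List.pyRange 1 (n + 1) 1, [])] []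

-- ===== PRECONDITION & SPEC =====
def Spec_gen_parts (n : Int) (max_size : Int) (out : List (List (List Int))) : Prop := out = gen_parts_alt n max_size
instance (n : Int) (max_size : Int) (out : List (List (List Int))) : Decidable (Spec_gen_parts n max_size out) := by unfold Spec_gen_parts; infer_instance

-- ===== CLAIM (what is proved, stated in full; the proofs are below) =====
def Claim_equal_gen_parts : Prop := ∀ (n : Int) (max_size : Int), Dom_gen_parts n max_size → Spec_gen_parts n max_size (gen_parts n max_size)

-- ===== LEMMAS AND PROOFS =====

-- value of the i-branch of A (and of the pushed state of B)
def branch (max_size : Int) (person : Int) (rest : List Int) (curr : List (List Int))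
    (i : Nat) : List (List (List Int)) :=
  if ((curr.getD i []).length : Int) < max_size then
    splitA max_size rest (curr.take i ++ [(curr.getD i []) ++ [person]] ++ curr.drop (i + 1))
  else []

theorem splitA_nil (max_size : Int) (curr : List (List Int)) :
    splitA max_size [] curr = if curr.length > 1 then [curr] else [] := by
  rw [splitA.eq_def]

theorem splitA_cons (max_size person : Int) (rest : List Int) (curr : List (List Int)) :
    splitA max_size (person :: rest) curr
      = splitARange max_size person rest curr (List.range curr.length) []
        ++ splitA max_size rest (curr ++ [[person]]) := by
  rw [splitA.eq_def]

theorem branch_pos (max_size person : Int) (rest : List Int) (curr : List (List Int)) (i : Nat)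
    (hc : ((curr.getD i []).length : Int) < max_size) :
    branch max_size person rest curr i
      = splitA max_size rest
          (curr.take i ++ [(curr.getD i []) ++ [person]] ++ curr.drop (i + 1)) := by
  unfold branch; rw [if_pos hc]

theorem branch_neg (max_size person : Int) (rest : List Int) (curr : List (List Int)) (i : Nat)
    (hc : ¬ ((curr.getD i []).length : Int) < max_size) :
    branch max_size person rest curr i = [] := by
  unfold branch; rw [if_neg hc]

theorem splitARange_acc (max_size : Int) (person : Int) (rest : List Int)
    (curr : List (List Int)) (is : List Nat) (acc : List (List (List Int))) :
    splitARange max_size person rest curr is acc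
      = acc ++ (is.map (branch max_size person rest curr)).flatten := by
  induction is generalizing acc with
  | nil => simp [splitARange]
  | cons i is ih =>
    rw [splitARange, ih]
    simp only [List.map_cons, List.flatten_cons]
    by_cases hc : ((curr.getD i []).length : Int) < max_size
    · rw [if_pos hc, branch_pos _ _ _ _ _ hc]; simp
    · rw [if_neg hc, branch_neg _ _ _ _ _ hc]; simp

theorem altPush_flatten (max_size : Int) (person : Int) (rest : List Int)
    (curr : List (List Int)) (is : List Nat) (st : List (List Int × List (List Int))) :
    ((altPush max_size person rest curr is st).map
        (fun p => splitA max_size p.1 p.2)).flatten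
      = (is.reverse.map (branch max_size person rest curr)).flatten
        ++ (st.map (fun p => splitA max_size p.1 p.2)).flatten := by
  induction is generalizing st with
  | nil => simp [altPush]
  | cons i is ih =>
    rw [altPush]
    by_cases hc : ((curr.getD i []).length : Int) < max_size
    · rw [if_pos hc, ih]
      simp only [List.map_cons, List.flatten_cons, List.reverse_cons, List.map_append,
        List.flatten_append]
      rw [branch_pos _ _ _ _ _ hc]
      simp
    · rw [if_neg hc, ih]
      simp only [List.reverse_cons, List.map_append, List.flatten_append, List.map_cons,
        List.flatten_cons]
      rw [branch_neg _ _ _ _ _ hc]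
      simp

theorem altLoop_eq (max_size : Int) :
    ∀ (N : Nat) (st : List (List Int × List (List Int))) (res : List (List (List Int))),
      pvMeas st ≤ N →
      altLoop max_size st res
        = res ++ (st.map (fun p => splitA max_size p.1 p.2)).flatten := by
  intro N
  induction N with
  | zero =>
    intro st res h
    match st with
    | [] => simp [altLoop]
    | (remain, curr) :: st' =>
      exfalso
      have := pvG_pos remain.length curr.length
      rw [pvMeas_cons] at h; omega
  | succ N ih =>
    intro st res h
    match st with
    | [] => simp [altLoop]
    | (remain, curr) :: st' =>
      match remain with
      | [] =>
        have hm : pvMeas st' ≤ N := by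
          have := pvG_pos 0 curr.length
          rw [pvMeas_cons] at h
          simp only [List.length_nil] at h
          omega
        rw [altLoop, ih st' _ hm]
        simp only [List.map_cons, List.flatten_cons, splitA_nil]
        split <;> simp
      | person :: rest =>
        have hlt := pvMeas_step max_size person rest curr st'
        have hm : pvMeas (altPush max_size person rest curr
            (List.range curr.length).reverse ((rest, curr ++ [[person]]) :: st')) ≤ N := by
          rw [pvMeas_cons, List.length_cons] at h
          omega
        rw [altLoop, ih _ _ hm, altPush_flatten]
        simp only [List.reverse_reverse, List.map_cons, List.flatten_cons, splitA_cons,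
          splitARange_acc]
        simp

-- ===== VERDICT (by name: the statement is the Claim_ definition above) =====
theorem gen_parts_spec : Claim_equal_gen_parts := by
  intro n max_size _
  unfold Spec_gen_parts gen_parts gen_parts_alt
  rw [altLoop_eq max_size (pvMeas [(PySem.List.pyRange 1 (n + 1) 1, [])]) _ _ le_rfl]
  simp
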